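-- pv_equiv track=rewrite | github.com/vik061/VictorsRandomTriviaSurvivalGame | game.py | make_medium_board_coordinates
-- ===== SOURCE A (Python) =====
-- def make_medium_board_coordinates(rows: int, columns: int) -> dict[tuple[int, int], str]:
--     """
--     Make the medium board coordinates for the game board.
--
--     :param rows: an integer
--     :param columns: an integer
--     :precondition: rows and columns are positive non-zero integers
--     :postcondition: make the medium board coordinates
--     :return: a dictionary with the tuple of (row, coordinate) as the key and a string level description as the value
--
--     >>> rows_5 = 5
--     >>> columns_5 = 5
--     >>> make_medium_board_coordinates(rows_5, columns_5)
--     {(0, 4): 'Medium', (1, 3): 'Medium', (2, 2): 'Medium', (2, 3): 'Medium', (3, 0): 'Medium', (3, 1): 'Medium',\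
--  (3, 2): 'Medium', (4, 0): 'Medium', (4, 1): 'Medium'}
--     """
--     medium_board_dictionary = {}
--
--     for row_coordinate in range(rows):
--         for column_coordinate in range(columns):
--             if (row_coordinate == 0 and column_coordinate == 4) \
--                     or (row_coordinate == 1 and column_coordinate == 3) \
--                     or (row_coordinate == 2 and 2 <= column_coordinate <= 3) \
--                     or (row_coordinate == 3 and column_coordinate <= 2) \
--                     or (row_coordinate == 4 and column_coordinate <= 1):
--                 medium_board_dictionary[(row_coordinate, column_coordinate)] = "Medium"
--     return medium_board_dictionary
-- ===== SOURCE B (Python) =====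
-- # B: emit the predetermined "Medium" cells, filtered by board bounds — O(1) instead of scanning the whole rows x columns grid.
-- MEDIUM_CELLS = [(0, 4), (1, 3), (2, 2), (2, 3), (3, 0), (3, 1), (3, 2), (4, 0), (4, 1)]
--
--
-- def make_medium_board_coordinates(rows: int, columns: int) -> dict[tuple[int, int], str]:
--     return {(row, column): "Medium"
--             for row, column in MEDIUM_CELLS
--             if row < rows and column < columns}
-- ===== Notes on version B (the rewrite author's own statement) =====
-- stated objective: faster
-- what changed: B replaces the full rows x columns double scan with a fixed 9-element coordinate list filtered by the board bounds, emitted in the same row-major order.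
import Mathlib
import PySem

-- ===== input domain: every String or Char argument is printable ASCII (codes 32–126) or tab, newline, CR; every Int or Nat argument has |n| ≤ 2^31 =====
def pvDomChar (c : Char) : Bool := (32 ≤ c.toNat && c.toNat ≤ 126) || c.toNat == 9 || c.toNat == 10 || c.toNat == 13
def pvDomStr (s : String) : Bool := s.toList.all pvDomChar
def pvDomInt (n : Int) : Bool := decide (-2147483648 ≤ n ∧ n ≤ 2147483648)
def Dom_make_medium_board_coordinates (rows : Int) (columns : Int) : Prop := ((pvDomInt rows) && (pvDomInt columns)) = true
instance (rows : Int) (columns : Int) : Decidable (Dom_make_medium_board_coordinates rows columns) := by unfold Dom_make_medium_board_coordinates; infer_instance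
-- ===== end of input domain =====

-- B replaces A's full rows×columns double scan with a fixed 9-cell list filtered by the board bounds (O(1)); same row-major output.

-- ===== PORT A =====
-- the if-condition of A's inner loop, extracted verbatim
def medCond (row col : Int) : Bool :=
  (row == 0 && col == 4) || (row == 1 && col == 3) ||
  (row == 2 && (decide (2 ≤ col) && decide (col ≤ 3))) ||
  (row == 3 && decide (col ≤ 2)) || (row == 4 && decide (col ≤ 1))

def make_medium_board_coordinates (rows : Int) (columns : Int) : List (Int × Int × String) :=
  (((PySem.List.pyRange 0 rows 1).foldl (fun d row =>
      (PySem.List.pyRange 0 columns 1).foldl (fun d col =>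
        if medCond row col then d.insert (row, col) "Medium" else d) d)
      (PySem.Dict.empty)).items).map (fun kv => (kv.1.1, kv.1.2, kv.2))

-- ===== PORT B =====
def mediumCells : List (Int × Int) :=
  [(0, 4), (1, 3), (2, 2), (2, 3), (3, 0), (3, 1), (3, 2), (4, 0), (4, 1)]

def make_medium_board_coordinates_alt (rows : Int) (columns : Int) : List (Int × Int × String) :=
  (mediumCells.filter (fun p => decide (p.1 < rows) && decide (p.2 < columns))).map
    (fun p => (p.1, p.2, "Medium"))

-- ===== PRECONDITION & SPEC =====
def Spec_make_medium_board_coordinates (rows : Int) (columns : Int) (out : List (Int × Int × String)) : Prop := out = make_medium_board_coordinates_alt rows columns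
instance (rows : Int) (columns : Int) (out : List (Int × Int × String)) : Decidable (Spec_make_medium_board_coordinates rows columns out) := by unfold Spec_make_medium_board_coordinates; infer_instance

-- ===== CLAIM (what is proved, stated in full; the proofs are below) =====
def Claim_equal_make_medium_board_coordinates : Prop := ∀ (rows : Int) (columns : Int), Dom_make_medium_board_coordinates rows columns → Spec_make_medium_board_coordinates rows columns (make_medium_board_coordinates rows columns)

-- ===== LEMMAS AND PROOFS =====

lemma foldl_id_of {α β : Type} (f : α → β → α) (l : List β)
    (h : ∀ d x, x ∈ l → f d x = d) (d : α) : l.foldl f d = d := by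
  induction l generalizing d with
  | nil => rfl
  | cons x xs ih =>
    simp only [List.foldl_cons, h d x (by simp)]
    exact ih (fun d y hy => h d y (by simp [hy])) d

lemma medCond_false_row {row : Int} (col : Int) (h : 5 ≤ row) : medCond row col = false := by
  simp [medCond]; omega

lemma medCond_false_col (row : Int) {col : Int} (h : 5 ≤ col) : medCond row col = false := by
  simp [medCond]; omega

lemma A_rows_ge {rows : Int} (columns : Int) (h : 5 ≤ rows) :
    make_medium_board_coordinates rows columns = make_medium_board_coordinates 5 columns := by
  unfold make_medium_board_coordinates
  rw [PySem.List.pyRange_one_append 0 5 rows (by norm_num) h, List.foldl_append]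
  refine congrArg _ (congrArg _ ?_)
  apply foldl_id_of
  intro d row hrow
  have h5 : 5 ≤ row := ((PySem.List.mem_pyRange_one).mp hrow).1
  apply foldl_id_of
  intro d' col _
  simp [medCond_false_row col h5]

lemma A_rows_le {rows : Int} (columns : Int) (h : rows ≤ 0) :
    make_medium_board_coordinates rows columns = make_medium_board_coordinates 0 columns := by
  unfold make_medium_board_coordinates
  rw [PySem.List.pyRange_one_eq_nil h, PySem.List.pyRange_one_eq_nil (le_refl 0)]

lemma A_cols_ge (rows : Int) {columns : Int} (h : 5 ≤ columns) :
    make_medium_board_coordinates rows columns = make_medium_board_coordinates rows 5 := by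
  unfold make_medium_board_coordinates
  refine congrArg _ (congrArg _ ?_)
  apply PySem.List.foldl_congr_mem
  intro d row _
  rw [PySem.List.pyRange_one_append 0 5 columns (by norm_num) h, List.foldl_append]
  apply foldl_id_of
  intro d' col hcol
  have h5 : 5 ≤ col := ((PySem.List.mem_pyRange_one).mp hcol).1
  simp [medCond_false_col row h5]

lemma A_cols_le (rows : Int) {columns : Int} (h : columns ≤ 0) :
    make_medium_board_coordinates rows columns = make_medium_board_coordinates rows 0 := by
  unfold make_medium_board_coordinates
  refine congrArg _ (congrArg _ ?_)
  apply PySem.List.foldl_congr_mem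
  intro d row _
  rw [PySem.List.pyRange_one_eq_nil h, PySem.List.pyRange_one_eq_nil (le_refl 0)]

lemma B_rows_ge {rows : Int} (columns : Int) (h : 5 ≤ rows) :
    make_medium_board_coordinates_alt rows columns = make_medium_board_coordinates_alt 5 columns := by
  unfold make_medium_board_coordinates_alt
  congr 1
  apply List.filter_congr
  intro p hp
  fin_cases hp <;> simp <;> omega

lemma B_rows_le {rows : Int} (columns : Int) (h : rows ≤ 0) :
    make_medium_board_coordinates_alt rows columns = make_medium_board_coordinates_alt 0 columns := by
  unfold make_medium_board_coordinates_alt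
  congr 1
  apply List.filter_congr
  intro p hp
  fin_cases hp <;> simp <;> omega

lemma B_cols_ge (rows : Int) {columns : Int} (h : 5 ≤ columns) :
    make_medium_board_coordinates_alt rows columns = make_medium_board_coordinates_alt rows 5 := by
  unfold make_medium_board_coordinates_alt
  congr 1
  apply List.filter_congr
  intro p hp
  fin_cases hp <;> simp <;> omega

lemma B_cols_le (rows : Int) {columns : Int} (h : columns ≤ 0) :
    make_medium_board_coordinates_alt rows columns = make_medium_board_coordinates_alt rows 0 := by
  unfold make_medium_board_coordinates_alt
  congr 1
  apply List.filter_congr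
  intro p hp
  fin_cases hp <;> simp <;> omega

lemma clamped_eq (rows columns : Int) (hr1 : 0 ≤ rows) (hr2 : rows ≤ 5)
    (hc1 : 0 ≤ columns) (hc2 : columns ≤ 5) :
    make_medium_board_coordinates rows columns = make_medium_board_coordinates_alt rows columns := by
  interval_cases rows <;> interval_cases columns <;> decide

-- ===== VERDICT (by name: the statement is the Claim_ definition above) =====
theorem make_medium_board_coordinates_spec : Claim_equal_make_medium_board_coordinates := by
  intro rows columns _
  unfold Spec_make_medium_board_coordinates
  -- clamp rows into [0,5]
  have hr : ∃ r, 0 ≤ r ∧ r ≤ 5 ∧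
      make_medium_board_coordinates rows columns = make_medium_board_coordinates r columns ∧
      make_medium_board_coordinates_alt rows columns = make_medium_board_coordinates_alt r columns := by
    rcases (by omega : 5 ≤ rows ∨ rows < 5) with h | h
    · exact ⟨5, by norm_num, by norm_num, A_rows_ge columns h, B_rows_ge columns h⟩
    rcases (by omega : rows ≤ 0 ∨ 0 < rows) with h0 | h0
    · exact ⟨0, le_refl 0, by norm_num, A_rows_le columns h0, B_rows_le columns h0⟩
    · exact ⟨rows, by omega, by omega, rfl, rfl⟩
  rcases hr with ⟨r, hr1, hr2, hA, hB⟩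
  rw [hA, hB]
  have hc : ∃ c, 0 ≤ c ∧ c ≤ 5 ∧
      make_medium_board_coordinates r columns = make_medium_board_coordinates r c ∧
      make_medium_board_coordinates_alt r columns = make_medium_board_coordinates_alt r c := by
    rcases (by omega : 5 ≤ columns ∨ columns < 5) with h | h
    · exact ⟨5, by norm_num, by norm_num, A_cols_ge r h, B_cols_ge r h⟩
    rcases (by omega : columns ≤ 0 ∨ 0 < columns) with h0 | h0
    · exact ⟨0, le_refl 0, by norm_num, A_cols_le r h0, B_cols_le r h0⟩
    · exact ⟨columns, by omega, by omega, rfl, rfl⟩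
  rcases hc with ⟨c, hc1, hc2, hA', hB'⟩
  rw [hA', hB']
  exact clamped_eq r c hr1 hr2 hc1 hc2
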